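-- pv_equiv track=rewrite | github.com/csalguero10/MultimediaDataModeling | info_retrieval/boolean_query.py | boolean_query
-- ===== SOURCE A (Python) =====
-- def boolean_query(documents, keywords, query):
--     # Crear una matriz binaria para las palabras clave
--     binary_matrix = []
--
--     for doc in documents:
--         row = []
--         for keyword in keywords:
--             row.append(1 if keyword in doc else 0)
--         binary_matrix.append(row)
--
--     # Evaluar la consulta booleana
--     query_terms = query.split()
--     result = [1] * len(documents)  # Inicializar con todos los documentos
--
--     for term in query_terms:
--         if term == 'AND':
--             continue
--         elif term.startswith('NOT'):
--             keyword = term[4:]  # Extraer la palabra clave después de 'NOT'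
--             for i, doc in enumerate(binary_matrix):
--                 if keyword in keywords and doc[keywords.index(keyword)] == 1:
--                     result[i] = 0  # Excluir este documento
--         else:  # Es un término normal (AND)
--             if term in keywords:
--                 index = keywords.index(term)
--                 for i, doc in enumerate(binary_matrix):
--                     if doc[index] == 0:
--                         result[i] = 0  # Excluir este documento si no contiene el término
--
--     return [documents[i] for i in range(len(documents)) if result[i] == 1]
-- ===== SOURCE B (Python) =====
-- def boolean_query(documents, keywords, query):
--     kw = set(keywords)
--     terms = query.split()
--
--     def keep(doc):
--         for t in terms:
--             if t == 'AND':
--                 continue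
--             if t.startswith('NOT'):
--                 k = t[4:]
--                 if k in kw and k in doc:
--                     return False
--             elif t in kw and t not in doc:
--                 return False
--         return True
--
--     return [doc for doc in documents if keep(doc)]
-- ===== Notes on version B (the rewrite author's own statement) =====
-- stated objective: faster
-- what changed: B drops the full documents-by-keywords binary matrix and the per-term passes over it: it builds a keyword set once and filters documents with a short-circuiting per-document predicate that tests only the query's terms.
import Mathlib
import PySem

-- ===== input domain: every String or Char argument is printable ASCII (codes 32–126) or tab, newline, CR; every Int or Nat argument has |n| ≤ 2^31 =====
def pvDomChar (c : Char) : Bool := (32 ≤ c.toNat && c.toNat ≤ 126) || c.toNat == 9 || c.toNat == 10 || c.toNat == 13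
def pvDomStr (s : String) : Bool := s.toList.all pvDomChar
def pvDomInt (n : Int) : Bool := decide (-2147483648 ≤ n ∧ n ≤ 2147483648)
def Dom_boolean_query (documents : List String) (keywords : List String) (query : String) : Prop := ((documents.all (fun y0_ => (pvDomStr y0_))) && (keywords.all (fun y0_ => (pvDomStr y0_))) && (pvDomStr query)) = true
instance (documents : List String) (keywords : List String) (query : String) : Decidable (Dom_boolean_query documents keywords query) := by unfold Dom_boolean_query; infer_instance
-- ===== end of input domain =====

-- B replaces A's full documents×keywords binary matrix and per-term sweeps over it by a
-- keyword set built once and a single filter of the documents with a short-circuiting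
-- per-document predicate over the query's terms (asymptotically less work when keywords ≫ query terms).

-- ===== PORT A =====
def boolean_query (documents : List String) (keywords : List String) (query : String) : List String :=
  -- binary_matrix: one 0/1 row per document, one column per keyword
  let binary_matrix : List (List Int) :=
    documents.foldl (fun m doc =>
      m ++ [keywords.foldl (fun row keyword =>
        row ++ [if PySem.Str.isIn keyword doc then (1 : Int) else 0]) []]) []
  let query_terms := PySem.Str.split₀ query
  let result : List Int := List.replicate documents.length 1
  let result := query_terms.foldl (fun result term =>
    if term == "AND" then result
    else if PySem.Str.startswith term "NOT" then
      let keyword := PySem.Str.slice term (some 4) none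
      (PySem.List.enumerate binary_matrix).foldl (fun res p =>
        -- 'keyword in keywords and doc[keywords.index(keyword)] == 1'
        if keywords.contains keyword &&
            (((PySem.List.index? keywords keyword).bind
              (fun j => PySem.List.pyGet? p.2 (j : Int))) == some 1) then
          res.set p.1.toNat 0
        else res) result
    else
      if keywords.contains term then
        match PySem.List.index? keywords term with
        | some index =>
          (PySem.List.enumerate binary_matrix).foldl (fun res p =>
            if PySem.List.pyGet? p.2 (index : Int) == some 0 then
              res.set p.1.toNat 0
            else res) result
        | none => result  -- unreachable: term ∈ keywords
      else result) result
  (List.range documents.length).foldl (fun (out : List String) (i : Nat) =>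
    if PySem.List.pyGet? result (i : Int) == some 1 then
      out ++ [documents.getD i ""]
    else out) []

-- ===== PORT B =====
-- one term of the query: True = this term does not exclude doc
def bq_keep (kw : PySem.Set String) (terms : List String) (doc : String) : Bool :=
  terms.all (fun t =>
    if t == "AND" then true
    else if PySem.Str.startswith t "NOT" then
      let k := PySem.Str.slice t (some 4) none
      !(PySem.Set.contains kw k && PySem.Str.isIn k doc)
    else !(PySem.Set.contains kw t && !(PySem.Str.isIn t doc)))

def boolean_query_alt (documents : List String) (keywords : List String) (query : String) : List String :=
  let kw := PySem.Set.ofList keywords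
  let terms := PySem.Str.split₀ query
  documents.filter (bq_keep kw terms)

-- ===== PRECONDITION & SPEC =====
def Spec_boolean_query (documents : List String) (keywords : List String) (query : String) (out : List String) : Prop := out = boolean_query_alt documents keywords query
instance (documents : List String) (keywords : List String) (query : String) (out : List String) : Decidable (Spec_boolean_query documents keywords query out) := by unfold Spec_boolean_query; infer_instance

-- ===== CLAIM (what is proved, stated in full; the proofs are below) =====
def Claim_equal_boolean_query : Prop := ∀ (documents : List String) (keywords : List String) (query : String), Dom_boolean_query documents keywords query → Spec_boolean_query documents keywords query (boolean_query documents keywords query)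

-- ===== LEMMAS AND PROOFS =====

-- the 0/1 matrix entry for keyword k in document d
def bq_entry (d k : String) : Int := if PySem.Str.isIn k d then 1 else 0

-- A's matrix row for document d
def bq_row (keywords : List String) (d : String) : List Int :=
  keywords.map (bq_entry d)

-- does term t exclude document d (given the keyword list)?
def bq_excl (keywords : List String) (t d : String) : Bool :=
  if t == "AND" then false
  else if PySem.Str.startswith t "NOT" then
    keywords.contains (PySem.Str.slice t (some 4) none) &&
      PySem.Str.isIn (PySem.Str.slice t (some 4) none) d
  else keywords.contains t && !(PySem.Str.isIn t d)

lemma bq_keep_eq (keywords terms : List String) (d : String) :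
    bq_keep (PySem.Set.ofList keywords) terms d = !terms.any (fun t => bq_excl keywords t d) := by
  unfold bq_keep
  rw [List.all_eq_not_any_not]
  congr 1
  refine PySem.List.any_congr_mem (fun t _ => ?_)
  unfold bq_excl
  split_ifs <;>
    simp [PySem.Set.contains, PySem.Set.mem_ofList]

-- matrix lookup: for k ∈ keywords, row access through index? yields the entry for k
lemma bq_row_lookup (keywords : List String) (d k : String) (h : keywords.contains k = true) :
    ((PySem.List.index? keywords k).bind
      (fun j => PySem.List.pyGet? (bq_row keywords d) (j : Int))) = some (bq_entry d k) := by
  have hm : k ∈ keywords := by simpa using h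
  rcases Option.isSome_iff_exists.mp ((PySem.List.index?_isSome_iff keywords k).mpr hm) with ⟨j, hj⟩
  rcases PySem.List.getElem_of_index?_eq_some hj with ⟨hjlt, hk, _⟩
  rw [hj]
  simp only [Option.bind_some, PySem.List.pyGet?_natCast, bq_row]
  rw [List.getElem?_map]
  rw [List.getElem?_eq_getElem hjlt]
  simp [hk]

-- one inner sweep over the enumerated matrix, written with an arbitrary prefix to drive the induction
lemma bq_enum_set_go {α β : Type} (g : α → β) (c : β → Bool) (f : α → Int)
    (xs : List α) (l0 : List Int) :
    (PySem.List.enumerate (xs.map g) (l0.length : Int)).foldl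
      (fun res p => if c p.2 then res.set p.1.toNat 0 else res) (l0 ++ xs.map f)
    = l0 ++ xs.map (fun d => if c (g d) then 0 else f d) := by
  induction xs generalizing l0 with
  | nil => simp [PySem.List.enumerate_nil]
  | cons x xs ih =>
    simp only [List.map_cons, PySem.List.enumerate_cons, List.foldl_cons]
    have hset : (l0 ++ f x :: xs.map f).set ((l0.length : Int)).toNat 0
        = (l0 ++ [(0 : Int)]) ++ xs.map f := by
      simp
    have hstep : (if c (g x) then (l0 ++ f x :: xs.map f).set ((l0.length : Int)).toNat 0
          else l0 ++ f x :: xs.map f)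
        = (l0 ++ [if c (g x) then 0 else f x]) ++ xs.map f := by
      by_cases h : c (g x) = true
      · simp [h]
      · simp [Bool.not_eq_true] at h
        simp [h, List.append_assoc]
    rw [hstep]
    have hlen : ((l0.length : Int)) + 1 = (((l0 ++ [if c (g x) then 0 else f x]).length : Nat) : Int) := by
      simp
    rw [hlen, ih (l0 ++ [if c (g x) then 0 else f x])]
    by_cases h : c (g x) = true <;> simp [h, List.append_assoc]

lemma bq_enum_set {α β : Type} (g : α → β) (c : β → Bool) (f : α → Int) (xs : List α) :
    (PySem.List.enumerate (xs.map g)).foldl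
      (fun res p => if c p.2 then res.set p.1.toNat 0 else res) (xs.map f)
    = xs.map (fun d => if c (g d) then 0 else f d) := by
  have := bq_enum_set_go g c f xs []
  simpa using this

-- one query-term step of A, on a result list of the shape 'documents.map f'
lemma bq_step (documents keywords : List String) (t : String) (f : String → Int) :
    (if t == "AND" then documents.map f
    else if PySem.Str.startswith t "NOT" then
      (PySem.List.enumerate (documents.map (bq_row keywords))).foldl (fun res p =>
        if keywords.contains (PySem.Str.slice t (some 4) none) &&
            (((PySem.List.index? keywords (PySem.Str.slice t (some 4) none)).bind
              (fun j => PySem.List.pyGet? p.2 (j : Int))) == some 1) then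
          res.set p.1.toNat 0
        else res) (documents.map f)
    else
      if keywords.contains t then
        match PySem.List.index? keywords t with
        | some index =>
          (PySem.List.enumerate (documents.map (bq_row keywords))).foldl (fun res p =>
            if PySem.List.pyGet? p.2 (index : Int) == some 0 then
              res.set p.1.toNat 0
            else res) (documents.map f)
        | none => documents.map f
      else documents.map f)
    = documents.map (fun d => if bq_excl keywords t d then 0 else f d) := by
  by_cases hAND : (t == "AND") = true
  · simp only [hAND, if_true]
    refine (List.map_congr_left ?_).symm
    intro d _
    simp [bq_excl, hAND]
  · simp only [hAND, Bool.false_eq_true, if_false]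
    by_cases hNOT : PySem.Str.startswith t "NOT" = true
    · simp only [hNOT, if_true]
      set k := PySem.Str.slice t (some 4) none with hk
      rw [bq_enum_set (bq_row keywords)
        (fun row => keywords.contains k &&
          (((PySem.List.index? keywords k).bind
            (fun j => PySem.List.pyGet? row (j : Int))) == some 1)) f documents]
      refine List.map_congr_left ?_
      intro d _
      by_cases hmem : keywords.contains k = true
      · rw [bq_row_lookup keywords d k hmem]
        simp only [bq_excl, hAND, Bool.false_eq_true, if_false, hNOT, if_true, ← hk, hmem,
          Bool.true_and]
        by_cases hin : PySem.Str.isIn k d = true <;> simp [bq_entry, hin]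
      · simp only [Bool.not_eq_true] at hmem
        have hnm : k ∉ keywords := by simpa using hmem
        have hN' : PySem.Chars.startswith t.toList ['N', 'O', 'T'] = true := by
          simpa using hNOT
        simp [bq_excl, hAND, hN', ← hk, hnm]
    · simp only [hNOT, Bool.false_eq_true, if_false]
      by_cases hmem : keywords.contains t = true
      · simp only [hmem, if_true]
        have hm : t ∈ keywords := by simpa using hmem
        rcases Option.isSome_iff_exists.mp ((PySem.List.index?_isSome_iff keywords t).mpr hm)
          with ⟨j, hj⟩
        rw [hj]
        show (PySem.List.enumerate (documents.map (bq_row keywords))).foldl (fun res p =>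
            if PySem.List.pyGet? p.2 (j : Int) == some 0 then res.set p.1.toNat 0 else res)
            (documents.map f) = _
        rw [bq_enum_set (bq_row keywords)
          (fun row => PySem.List.pyGet? row (j : Int) == some 0) f documents]
        refine List.map_congr_left ?_
        intro d _
        have := bq_row_lookup keywords d t hmem
        rw [hj] at this
        simp only [Option.bind_some] at this
        rw [this]
        simp only [bq_excl, hAND, Bool.false_eq_true, if_false, hNOT, hmem, Bool.true_and]
        by_cases hin : PySem.Str.isIn t d = true <;> simp [bq_entry, hin]
      · simp only [Bool.not_eq_true] at hmem
        have hnm : t ∉ keywords := by simpa using hmem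
        simp only [hmem, Bool.false_eq_true, if_false]
        refine (List.map_congr_left ?_).symm
        intro d _
        simp only [Bool.not_eq_true] at hNOT
        have hN' : PySem.Chars.startswith t.toList ['N', 'O', 'T'] = false := by
          simpa using hNOT
        simp [bq_excl, hAND, hN', hnm]

-- A's whole term loop, by induction over the query terms
lemma bq_terms_fold (documents keywords : List String) (terms : List String) (f : String → Int) :
    terms.foldl (fun result term =>
      if term == "AND" then result
      else if PySem.Str.startswith term "NOT" then
        (PySem.List.enumerate (documents.map (bq_row keywords))).foldl (fun res p =>
          if keywords.contains (PySem.Str.slice term (some 4) none) &&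
              (((PySem.List.index? keywords (PySem.Str.slice term (some 4) none)).bind
                (fun j => PySem.List.pyGet? p.2 (j : Int))) == some 1) then
            res.set p.1.toNat 0
          else res) result
      else
        if keywords.contains term then
          match PySem.List.index? keywords term with
          | some index =>
            (PySem.List.enumerate (documents.map (bq_row keywords))).foldl (fun res p =>
              if PySem.List.pyGet? p.2 (index : Int) == some 0 then
                res.set p.1.toNat 0
              else res) result
          | none => result
        else result) (documents.map f)
    = documents.map (fun d => if terms.any (fun t => bq_excl keywords t d) then 0 else f d) := by
  induction terms generalizing f with
  | nil => simp
  | cons t ts ih =>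
    rw [List.foldl_cons, bq_step documents keywords t f,
      ih (fun d => if bq_excl keywords t d then 0 else f d)]
    refine List.map_congr_left ?_
    intro d _
    by_cases h1 : bq_excl keywords t d = true <;>
      by_cases h2 : ts.any (fun t => bq_excl keywords t d) = true <;>
      simp [h1, h2]

-- the final comprehension over range(len(documents)) is a filter of documents
lemma bq_range_pick (documents : List String) (h : String → Int) :
    (List.range documents.length).foldl (fun (out : List String) (i : Nat) =>
      if PySem.List.pyGet? (documents.map h) (i : Int) == some 1 then
        out ++ [documents.getD i ""]
      else out) []
    = documents.filter (fun d => h d == 1) := by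
  induction documents using List.reverseRecOn with
  | nil => simp [List.range_zero]
  | append_singleton ds d ih =>
    rw [List.length_append, List.length_singleton, List.range_succ, List.foldl_append]
    have hcongr : (List.range ds.length).foldl (fun (out : List String) (i : Nat) =>
        if PySem.List.pyGet? ((ds ++ [d]).map h) (i : Int) == some 1 then
          out ++ [(ds ++ [d]).getD i ""]
        else out) []
      = (List.range ds.length).foldl (fun (out : List String) (i : Nat) =>
        if PySem.List.pyGet? (ds.map h) (i : Int) == some 1 then
          out ++ [ds.getD i ""]
        else out) [] := by
      apply PySem.List.foldl_congr_mem
      intro out i hi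
      have hlt : i < ds.length := List.mem_range.mp hi
      have e1 : PySem.List.pyGet? ((ds ++ [d]).map h) (i : Int)
          = PySem.List.pyGet? (ds.map h) (i : Int) := by
        simp only [PySem.List.pyGet?_natCast, List.map_append]
        rw [List.getElem?_append_left (by simpa using hlt)]
      have e2 : (ds ++ [d]).getD i "" = ds.getD i "" := by
        simp only [List.getD]
        rw [List.getElem?_append_left hlt]
      rw [e1, e2]
    rw [hcongr, ih]
    have eget : PySem.List.pyGet? ((ds ++ [d]).map h) ((ds.length : Nat) : Int) = some (h d) := by
      simp [List.map_append]
    have egetD : (ds ++ [d]).getD ds.length "" = d := by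
      simp [List.getD]
    rw [List.foldl_cons, List.foldl_nil, eget, egetD]
    by_cases hd : (h d == 1) = true <;> simp [hd, List.filter_append]

-- both inner appending loops of A's matrix construction are maps
lemma bq_matrix_eq (documents keywords : List String) :
    documents.foldl (fun m doc =>
      m ++ [keywords.foldl (fun row keyword =>
        row ++ [if PySem.Str.isIn keyword doc then (1 : Int) else 0]) []]) []
    = documents.map (bq_row keywords) := by
  have inner : ∀ doc, keywords.foldl (fun row keyword =>
      row ++ [if PySem.Str.isIn keyword doc then (1 : Int) else 0]) [] = bq_row keywords doc := by
    intro doc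
    have := PySem.List.foldl_append_singleton_eq_map
      (fun keyword => if PySem.Str.isIn keyword doc then (1 : Int) else 0) keywords []
    simpa [bq_row, bq_entry] using this
  calc documents.foldl (fun m doc =>
        m ++ [keywords.foldl (fun row keyword =>
          row ++ [if PySem.Str.isIn keyword doc then (1 : Int) else 0]) []]) []
      = documents.foldl (fun m doc => m ++ [bq_row keywords doc]) [] := by
        apply PySem.List.foldl_congr_mem
        intro m doc _
        rw [inner doc]
    _ = documents.map (bq_row keywords) := by
        simpa using PySem.List.foldl_append_singleton_eq_map (bq_row keywords) documents []

-- ===== VERDICT (by name: the statement is the Claim_ definition above) =====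
theorem boolean_query_spec : Claim_equal_boolean_query := by
  intro documents keywords query _
  unfold Spec_boolean_query
  simp only [boolean_query, boolean_query_alt]
  rw [bq_matrix_eq documents keywords]
  have hinit : List.replicate documents.length (1 : Int) = documents.map (fun _ => 1) := by
    simp [List.map_const']
  rw [hinit, bq_terms_fold documents keywords (PySem.Str.split₀ query) (fun _ => 1)]
  have hres : (documents.map (fun d =>
      if (PySem.Str.split₀ query).any (fun t => bq_excl keywords t d) then (0 : Int) else 1)) =
      documents.map (fun d => if bq_keep (PySem.Set.ofList keywords) (PySem.Str.split₀ query) d then 1 else 0) := by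
    refine List.map_congr_left (fun d _ => ?_)
    rw [bq_keep_eq]
    by_cases h : (PySem.Str.split₀ query).any (fun t => bq_excl keywords t d) = true <;> simp [h]
  rw [hres, bq_range_pick documents
    (fun d => if bq_keep (PySem.Set.ofList keywords) (PySem.Str.split₀ query) d then 1 else 0)]
  refine List.filter_congr (fun d _ => ?_)
  by_cases h : bq_keep (PySem.Set.ofList keywords) (PySem.Str.split₀ query) d = true <;> simp [h]
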